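-- pv_equiv track=rewrite | github.com/tomoumer/advent_of_code | 2016/src/d19.py | elves_circular_elephant
-- ===== SOURCE A (Python) =====
-- from collections import deque
--
-- def elves_circular_elephant(num_elves):
--
--     elves = deque([i for i in range(1, num_elves+1)])
--     while num_elves > 1:
--
--         # we always take the left one, so round down.
--         to_steal = num_elves // 2
--
--         elves.rotate(-to_steal)
--         elves.popleft()
--         elves.rotate(to_steal - 1)
--
--         num_elves -= 1
--
--     return elves[0]
-- ===== SOURCE B (Python) =====
-- def elves_circular_elephant(num_elves):
--     # O(n) arithmetic recurrence on the survivor's 0-based position; no deque.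
--     w = 0
--     for n in range(2, num_elves + 1):
--         t = n // 2
--         w = w + 1 if w < t - 1 else (w + 2) % n
--     return w + 1
-- ===== Notes on version B (the rewrite author's own statement) =====
-- stated objective: faster
-- what changed: Replaces the quadratic deque simulation (each step rotates the whole deque) by a linear arithmetic recurrence that tracks only the survivor's position as the circle grows one elf at a time.
import Mathlib
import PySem

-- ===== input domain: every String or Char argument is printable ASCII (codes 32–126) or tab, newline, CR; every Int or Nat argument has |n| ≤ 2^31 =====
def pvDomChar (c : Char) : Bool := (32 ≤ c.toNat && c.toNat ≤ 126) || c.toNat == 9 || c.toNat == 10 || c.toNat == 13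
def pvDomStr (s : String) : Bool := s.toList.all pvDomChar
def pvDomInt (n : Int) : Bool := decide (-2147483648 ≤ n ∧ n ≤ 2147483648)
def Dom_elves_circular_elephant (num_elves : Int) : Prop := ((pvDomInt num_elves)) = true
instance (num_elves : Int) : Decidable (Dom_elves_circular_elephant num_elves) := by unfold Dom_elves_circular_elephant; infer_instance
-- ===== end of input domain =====

-- B replaces A's O(n^2) deque simulation by an O(n) recurrence on the survivor's position (return value only; A never mutates its argument).

-- ===== PORT A =====
-- deque.rotate(j): right-rotation by j, i.e. left-rotation by (-j) mod len; no-op on the empty deque (exact Python semantics)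
def pyRotate (xs : List Int) (j : Int) : List Int :=
  if xs.length = 0 then xs
  else
    let k := (PySem.Int.mod (-j) (xs.length : Int)).toNat
    xs.drop k ++ xs.take k

-- the while-loop of A; elves.popleft() is .tail (the deque is nonempty whenever the body runs on A's reachable states)
def loopA (elves : List Int) (n : Int) : List Int :=
  if n > 1 then
    let to_steal := PySem.Int.floordiv n 2
    let e1 := pyRotate elves (-to_steal)
    let e2 := e1.tail
    let e3 := pyRotate e2 (to_steal - 1)
    loopA e3 (n - 1)
  else elves
termination_by n.toNat
decreasing_by omega

def elves_circular_elephant (num_elves : Int) : Int :=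
  let elves := PySem.List.pyRange 1 (num_elves + 1) 1
  PySem.List.pyGetD (loopA elves num_elves) 0 0

-- ===== PORT B =====
def elves_circular_elephant_alt (num_elves : Int) : Int :=
  let w := (PySem.List.pyRange 2 (num_elves + 1) 1).foldl
    (fun w n => if w < PySem.Int.floordiv n 2 - 1 then w + 1 else PySem.Int.mod (w + 2) n) 0
  w + 1

-- ===== PRECONDITION & SPEC =====
-- A raises IndexError (indexing an empty deque) for non-positive num_elves; those inputs are excluded.
def Pre_elves_circular_elephant (num_elves : Int) : Prop := 1 ≤ num_elves
instance (num_elves : Int) : Decidable (Pre_elves_circular_elephant num_elves) := by unfold Pre_elves_circular_elephant; infer_instance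
def pvWitness_elves_circular_elephant : Int := 5

def Spec_elves_circular_elephant (num_elves : Int) (out : Int) : Prop := out = elves_circular_elephant_alt num_elves
instance (num_elves : Int) (out : Int) : Decidable (Spec_elves_circular_elephant num_elves out) := by unfold Spec_elves_circular_elephant; infer_instance

-- ===== CLAIM (what is proved, stated in full; the proofs are below) =====
def Claim_equal_elves_circular_elephant : Prop := ∀ (num_elves : Int), Dom_elves_circular_elephant num_elves → Pre_elves_circular_elephant num_elves → Spec_elves_circular_elephant num_elves (elves_circular_elephant num_elves)

-- ===== LEMMAS AND PROOFS =====

-- survivor's 0-based position in a circle of n, under A's elimination rule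
def Wf : Nat → Nat
  | 0 => 0
  | 1 => 0
  | (n+2) => if Wf (n+1) + 1 < (n+2)/2 then Wf (n+1) + 1 else (Wf (n+1) + 2) % (n+2)

lemma Wf_lt (n : Nat) (h : 1 ≤ n) : Wf n < n := by
  match n, h with
  | 1, _ => simp [Wf]
  | (n+2), _ =>
    rw [Wf]
    split
    next hlt => have hd : (n+2)/2 ≤ n+2 := Nat.div_le_self _ _; omega
    next => exact Nat.mod_lt _ (by omega)
lemma loopA_step (xs : List Int) (N : Nat) (h : xs.length = N) (h2 : 2 ≤ N) :
    loopA xs (N : Int) =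
      loopA ((xs.take (N/2)).drop 1 ++ (xs.drop (N/2+1) ++ (xs.take (N/2)).take 1)) ((N : Int) - 1) := by
  generalize ht : N/2 = t
  have ht1 : 1 ≤ t := by omega
  have ht2 : 2 * t ≤ N ∧ N ≤ 2 * t + 1 := by omega
  have htN : t + 1 ≤ N := by omega
  rw [loopA, if_pos (by exact_mod_cast (by omega : (1:Int) < (N:Nat)))]
  have hfd : PySem.Int.floordiv ((N:Nat):Int) 2 = ((t:Nat):Int) := by
    rw [← ht]; exact_mod_cast PySem.Int.floordiv_natCast N 2
  rw [hfd]
  show loopA (pyRotate (pyRotate xs (-((t:Nat):Int))).tail (((t:Nat):Int) - 1)) ((N:Int) - 1) = _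
  -- first rotate
  have hr1 : pyRotate xs (-((t:Nat):Int)) = xs.drop t ++ xs.take t := by
    rw [pyRotate, if_neg (by omega)]
    have : PySem.Int.mod (-(-((t:Nat):Int))) ((xs.length:Nat):Int) = ((t % N : Nat):Int) := by
      rw [neg_neg, h]; exact_mod_cast PySem.Int.mod_natCast t N
    simp only [this, Nat.mod_eq_of_lt (by omega : t < N), Int.toNat_natCast]
  rw [hr1]
  -- tail
  have hne : xs.drop t ≠ [] := by
    intro hx; have := congrArg List.length hx; simp [h] at this; omega
  rw [List.tail_append_of_ne_nil hne, List.tail_drop]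
  -- second rotate
  have hlen2 : (xs.drop (t+1) ++ xs.take t).length = N - 1 := by simp [h]; omega
  have hmod : PySem.Int.mod (-(((t:Nat):Int) - 1)) (((N - 1 : Nat)):Int) = (((N - t) % (N - 1) : Nat) : Int) := by
    rw [PySem.Int.mod_eq_emod_of_pos (by exact_mod_cast (by omega : (0:Int) < ((N-1:Nat):Int)))]
    have : (-(((t:Nat):Int) - 1)) + ((N-1:Nat):Int) = ((N - t : Nat) : Int) := by omega
    rw [← Int.add_mul_emod_self_left (c := 1)]
    · rw [mul_one, this]; exact_mod_cast (Int.natCast_mod (N-t) (N-1)).symm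
  rw [pyRotate, if_neg (by rw [hlen2]; omega), hlen2, hmod]
  rcases Nat.lt_or_ge t 2 with hc | hc
  · -- t = 1
    have ht' : t = 1 := by omega
    subst ht'
    rw [Nat.mod_self]
    show loopA (List.drop ((Int.toNat ((0:Nat):Int))) (List.drop 2 xs ++ List.take 1 xs) ++
      List.take ((Int.toNat ((0:Nat):Int))) (List.drop 2 xs ++ List.take 1 xs)) ((N:Int) - 1) = _
    have e1 : (xs.take 1).drop 1 = [] := by
      apply List.eq_nil_of_length_eq_zero; simp
    simp [e1, List.take_take]
  · -- 2 ≤ t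
    have hk : (N - t) % (N - 1) = N - t := Nat.mod_eq_of_lt (by omega)
    rw [hk]
    show loopA (List.drop ((Int.toNat (((N-t:Nat)):Int))) (List.drop (t+1) xs ++ List.take t xs) ++
      List.take ((Int.toNat (((N-t:Nat)):Int))) (List.drop (t+1) xs ++ List.take t xs)) ((N:Int) - 1) = _
    rw [Int.toNat_natCast, List.drop_append, List.take_append]
    have hl1 : (xs.drop (t+1)).length = N - (t+1) := by simp [h]
    have d1 : (xs.drop (t+1)).drop (N - t) = [] := by
      apply List.eq_nil_of_length_eq_zero; simp [h]; omega
    have d2 : (xs.take t).drop (N - t - (xs.drop (t+1)).length) = (xs.take t).drop 1 := by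
      rw [hl1, show N - t - (N - (t+1)) = 1 by omega]
    have t1 : (xs.drop (t+1)).take (N - t) = xs.drop (t+1) := by
      apply List.take_of_length_le; omega
    have t2 : (xs.take t).take (N - t - (xs.drop (t+1)).length) = (xs.take t).take 1 := by
      rw [hl1, show N - t - (N - (t+1)) = 1 by omega]
    rw [d1, d2, t1, t2]
    simp

lemma E3_get (xs : List Int) (N j : Nat) (h : xs.length = N) (hN : 2 ≤ N) (hj : j < N - 1) :
    ((xs.take (N/2)).drop 1 ++ (xs.drop (N/2+1) ++ (xs.take (N/2)).take 1))[j]? =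
      if j + 1 < N/2 then xs[j+1]? else if j + 2 < N then xs[j+2]? else xs[0]? := by
  generalize ht : N/2 = t
  have ht1 : 1 ≤ t ∧ 2*t ≤ N ∧ N ≤ 2*t+1 := by omega
  have hlen1 : ((xs.take t).drop 1).length = t - 1 := by simp [h]; omega
  have hlen21 : (xs.drop (t+1)).length = N - (t+1) := by simp [h]
  by_cases c1 : j + 1 < t
  · rw [List.getElem?_append_left (by omega), List.getElem?_drop,
        List.getElem?_take_of_lt (by omega), if_pos c1]
    congr 1; omega
  · rw [List.getElem?_append_right (by omega), hlen1, if_neg c1]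
    by_cases c2 : j + 2 < N
    · rw [List.getElem?_append_left (by omega), List.getElem?_drop, if_pos c2]
      congr 1; omega
    · rw [List.getElem?_append_right (by omega), hlen21, if_neg c2,
          show j - (t-1) - (N - (t+1)) = 0 by omega, List.take_take]
      rw [show min 1 t = 1 by omega, List.getElem?_take_of_lt (by omega)]

lemma loopA_eq (N : Nat) (h1 : 1 ≤ N) : ∀ xs : List Int, xs.length = N →
    loopA xs (N : Int) = [(xs[Wf N]?).getD 0] := by
  induction N, h1 using Nat.le_induction with
  | base =>
    intro xs h
    obtain ⟨a, rfl⟩ := List.length_eq_one_iff.mp h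
    rw [loopA, if_neg (by norm_num)]
    simp [Wf]
  | succ n hn ih =>
    intro xs h
    obtain ⟨m, rfl⟩ := Nat.exists_eq_add_of_le hn
    rw [loopA_step xs (1+m+1) h (by omega),
        show ((1+m+1 : Nat) : Int) - 1 = ((1+m : Nat) : Int) by push_cast; ring,
        ih _ (by simp [h]; omega),
        E3_get xs (1+m+1) (Wf (1+m)) h (by omega) (by have := Wf_lt (1+m) (by omega); omega)]
    congr 2
    have hW := Wf_lt (1+m) (by omega)
    rw [show (1+m+1) = (m+2) by omega, Wf, show m+1 = 1+m by omega]
    by_cases c1 : Wf (1+m) + 1 < (m+2)/2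
    · rw [if_pos (by omega), if_pos c1]
    · rw [if_neg (by omega), if_neg c1]
      by_cases c2 : Wf (1+m) + 2 < m+2
      · rw [if_pos c2, Nat.mod_eq_of_lt (by omega)]
      · rw [if_neg c2, show (Wf (1+m) + 2) % (m+2) = 0 by
          rw [show Wf (1+m) + 2 = m+2 by omega, Nat.mod_self]]

lemma foldB (N : Nat) (h : 1 ≤ N) :
    (PySem.List.pyRange 2 ((N:Int) + 1) 1).foldl
      (fun w n => if w < PySem.Int.floordiv n 2 - 1 then w + 1 else PySem.Int.mod (w + 2) n) 0
    = (Wf N : Int) := by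
  induction N, h using Nat.le_induction with
  | base => rw [PySem.List.pyRange_one_eq_nil (by omega)]; simp [Wf]
  | succ n hn ih =>
    obtain ⟨m, rfl⟩ := Nat.exists_eq_add_of_le hn
    rw [show ((1 + m + 1 : Nat) : Int) + 1 = ((1 + m : Nat) : Int) + 1 + 1 by push_cast; ring,
        PySem.List.pyRange_one_succ_right (by push_cast; omega), List.foldl_append, ih]
    simp only [List.foldl_cons, List.foldl_nil]
    have e2 : ((1 + m : Nat) : Int) + 1 = ((m + 2 : Nat) : Int) := by push_cast; ring
    rw [e2]
    have hfd : PySem.Int.floordiv ((m+2:Nat):Int) 2 = (((m+2)/2 : Nat) : Int) := by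
      exact_mod_cast PySem.Int.floordiv_natCast (m+2) 2
    have hmd : PySem.Int.mod ((Wf (1+m) : Int) + 2) ((m+2:Nat):Int) = (((Wf (1+m) + 2) % (m+2) : Nat) : Int) := by
      rw [show ((Wf (1+m) : Int) + 2) = ((Wf (1+m) + 2 : Nat) : Int) by push_cast; ring]
      exact_mod_cast PySem.Int.mod_natCast _ _
    rw [hfd, hmd, show (1+m+1) = (m+2) by omega, Wf, show m+1 = 1+m by omega]
    split_ifs with hA hB hB
    · push_cast; ring
    · omega
    · omega
    · rfl

lemma altB_eq (N : Nat) (h : 1 ≤ N) :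
    elves_circular_elephant_alt (N : Int) = (Wf N : Int) + 1 := by
  unfold elves_circular_elephant_alt
  rw [foldB N h]

-- ===== VERDICT (by name: the statement is the Claim_ definition above) =====
theorem elves_circular_elephant_spec : Claim_equal_elves_circular_elephant := by
  intro n _ hpre
  unfold Spec_elves_circular_elephant Pre_elves_circular_elephant at *
  obtain ⟨N, rfl⟩ := Int.eq_ofNat_of_zero_le (by omega : (0:Int) ≤ n)
  have hN : 1 ≤ N := by exact_mod_cast hpre
  have hlen : (PySem.List.pyRange 1 ((N:Int) + 1) 1).length = N := by
    rw [PySem.List.length_pyRange_one]; omega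
  show PySem.List.pyGetD (loopA (PySem.List.pyRange 1 ((N:Int) + 1) 1) (N:Int)) 0 0 = _
  rw [loopA_eq N hN _ hlen, PySem.List.pyGetD_zero_cons, altB_eq N hN]
  have hW : Wf N < N := Wf_lt N hN
  rw [PySem.List.getElem?_pyRange_one, if_pos (by omega), Option.getD_some]
  omega
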